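-- pv_equiv track=rewrite | github.com/xianiax02/mila_coding_study | 백준/Silver/14501. 퇴사/퇴사.py | findmaxearning
-- ===== SOURCE A (Python) =====
-- def findmaxearning(day,current_earning,table):
--     if day>=len(table):
--         return current_earning
--     skipresult=findmaxearning(day+1,current_earning,table)
--     takeresult=current_earning
--     duration=table[day][0]
--     earning=table[day][1]
--     if day+duration<=len(table):
--         takeresult=findmaxearning(day+duration, current_earning+earning, table)
--     return max(skipresult,takeresult)
-- ===== SOURCE B (Python) =====
-- def findmaxearning(day, current_earning, table):
--     n = len(table)
--     if day >= n:
--         return current_earning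
--     # dp[0] is the best extra earning obtainable from the position being processed
--     # to the end; walk the positions day..n-1 back to front, prepending each value.
--     dp = [0]
--     for d in reversed(range(day, n)):
--         row = table[d]
--         duration, earning = row[0], row[1]
--         best = dp[0]
--         if 1 <= duration <= len(dp):
--             best = max(best, earning + dp[duration - 1])
--         dp = [best] + dp
--     return current_earning + dp[0]
-- ===== Notes on version B (the rewrite author's own statement) =====
-- stated objective: alternative
-- what changed: Replaces A's branching skip/take recursion by a single backward dynamic-programming pass that builds, back to front, the list of best extra earnings obtainable from each position onward.
import Mathlib
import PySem

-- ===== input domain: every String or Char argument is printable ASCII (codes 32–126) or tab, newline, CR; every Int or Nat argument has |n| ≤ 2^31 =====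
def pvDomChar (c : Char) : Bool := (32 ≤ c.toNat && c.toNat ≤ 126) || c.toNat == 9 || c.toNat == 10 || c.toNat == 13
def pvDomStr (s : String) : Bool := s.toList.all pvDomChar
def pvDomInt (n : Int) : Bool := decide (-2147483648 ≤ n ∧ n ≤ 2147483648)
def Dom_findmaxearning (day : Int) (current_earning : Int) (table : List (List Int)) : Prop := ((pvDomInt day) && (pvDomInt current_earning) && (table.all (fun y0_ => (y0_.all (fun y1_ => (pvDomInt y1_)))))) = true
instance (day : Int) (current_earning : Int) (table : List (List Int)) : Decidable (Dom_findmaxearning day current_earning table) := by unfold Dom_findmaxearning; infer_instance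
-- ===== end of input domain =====

-- B replaces A's exponential skip/take branching recursion by a single backward
-- dynamic-programming pass over the positions A recurses on (an alternative algorithm).

-- ===== PORT A =====
-- Literal port of A; the recursion is driven by Nat fuel, a totality guard only:
-- under Pre_findmaxearning the recursion depth is at most 2*len+1, so the fuel is never exhausted.
def findmaxearningFuel : Nat → Int → Int → List (List Int) → Int
  | 0, _, current_earning, _ => current_earning   -- fuel exhausted: unreachable under Pre_
  | fuel+1, day, current_earning, table =>
    if day ≥ (table.length : Int) then current_earning
    else
      let skipresult := findmaxearningFuel fuel (day+1) current_earning table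
      match PySem.List.pyGet? table day with
      | none => current_earning       -- Python raises IndexError here: outside Pre_
      | some row =>
        match PySem.List.pyGet? row 0, PySem.List.pyGet? row 1 with
        | some duration, some earning =>
          let takeresult :=
            if day + duration ≤ (table.length : Int) then
              findmaxearningFuel fuel (day+duration) (current_earning+earning) table
            else current_earning
          max skipresult takeresult
        | _, _ => current_earning     -- Python raises IndexError here: outside Pre_

def findmaxearning (day : Int) (current_earning : Int) (table : List (List Int)) : Int :=
  findmaxearningFuel (2 * table.length + 1) day current_earning table

-- ===== PORT B =====
-- loop body of Source B: the position d processed, its best value prepended to dp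
def pvBody (table : List (List Int)) (dp : List Int) (d : Int) : List Int :=
  let row := (PySem.List.pyGet? table d).getD []   -- row = table[d]; default [] only outside Pre_ (Python raises)
  let duration := (PySem.List.pyGet? row 0).getD 0 -- row[0]; default 0 only outside Pre_
  let earning := (PySem.List.pyGet? row 1).getD 0  -- row[1]
  let best := dp.headD 0
  let best := if 1 ≤ duration ∧ duration ≤ (dp.length : Int) then
      max best (earning + dp.getD (duration - 1).toNat 0)
    else best
  best :: dp

def findmaxearning_alt (day : Int) (current_earning : Int) (table : List (List Int)) : Int :=
  if day ≥ (table.length : Int) then current_earning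
  else
    let dp := ((PySem.List.pyRange day (table.length : Int)).reverse).foldl (pvBody table) [0]
    current_earning + dp.headD 0

-- ===== PRECONDITION & SPEC =====
-- Pre_ excludes exactly the inputs where A raises IndexError (day below -len(table), or a
-- reached row with fewer than 2 entries) or fails to terminate (a reachable duration ≤ 0);
-- the rows before the start day are not constrained (neither program reads them).
def Pre_findmaxearning (day : Int) (current_earning : Int) (table : List (List Int)) : Prop :=
  -(table.length : Int) ≤ day ∧
    ∀ row ∈ table.drop day.toNat, 2 ≤ row.length ∧ 1 ≤ row.headD 0
instance (day : Int) (current_earning : Int) (table : List (List Int)) : Decidable (Pre_findmaxearning day current_earning table) := by unfold Pre_findmaxearning; infer_instance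

def pvWitness_findmaxearning : Int × Int × List (List Int) := (0, 0, [[1, 2]])

def Spec_findmaxearning (day : Int) (current_earning : Int) (table : List (List Int)) (out : Int) : Prop := out = findmaxearning_alt day current_earning table
instance (day : Int) (current_earning : Int) (table : List (List Int)) (out : Int) : Decidable (Spec_findmaxearning day current_earning table out) := by unfold Spec_findmaxearning; infer_instance

-- ===== CLAIM (what is proved, stated in full; the proofs are below) =====
def Claim_equal_findmaxearning : Prop := ∀ (day : Int) (current_earning : Int) (table : List (List Int)), Dom_findmaxearning day current_earning table → Pre_findmaxearning day current_earning table → Spec_findmaxearning day current_earning table (findmaxearning day current_earning table)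

-- ===== LEMMAS AND PROOFS =====

-- dp list B has built once the loop has processed positions d..n-1 (foldl over the reverse = foldr)
def pvBuildFrom (table : List (List Int)) (d : Int) : List Int :=
  (PySem.List.pyRange d (table.length : Int)).foldr (fun d dp => pvBody table dp d) [0]

lemma pvBody_eq (table : List (List Int)) (dp : List Int) (d : Int) :
    pvBody table dp d =
      (if 1 ≤ (PySem.List.pyGet? ((PySem.List.pyGet? table d).getD []) 0).getD 0 ∧
          (PySem.List.pyGet? ((PySem.List.pyGet? table d).getD []) 0).getD 0 ≤ (dp.length : Int) then
        max (dp.headD 0)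
          ((PySem.List.pyGet? ((PySem.List.pyGet? table d).getD []) 1).getD 0 +
            dp.getD ((PySem.List.pyGet? ((PySem.List.pyGet? table d).getD []) 0).getD 0 - 1).toNat 0)
      else dp.headD 0) :: dp := rfl

lemma pvBuildFrom_of_ge (table : List (List Int)) (d : Int) (h : (table.length : Int) ≤ d) :
    pvBuildFrom table d = [0] := by
  unfold pvBuildFrom
  rw [show PySem.List.pyRange d (table.length : Int) = [] by
    simp [PySem.List.pyRange]; omega]
  rfl

lemma pvBuildFrom_of_lt (table : List (List Int)) (d : Int) (h : d < (table.length : Int)) :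
    pvBuildFrom table d = pvBody table (pvBuildFrom table (d + 1)) d := by
  unfold pvBuildFrom
  rw [PySem.List.pyRange_one_cons h, List.foldr_cons]

lemma pvBuildFrom_length (table : List (List Int)) :
    ∀ (k : Nat) (d : Int), ((table.length : Int) - d).toNat ≤ k →
      (pvBuildFrom table d).length = ((table.length : Int) - d).toNat + 1 := by
  intro k
  induction k with
  | zero =>
    intro d hk
    rw [pvBuildFrom_of_ge table d (by omega)]
    simp; omega
  | succ k ih =>
    intro d hk
    by_cases h : (table.length : Int) ≤ d
    · rw [pvBuildFrom_of_ge table d h]; simp; omega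
    · rw [pvBuildFrom_of_lt table d (by omega), pvBody_eq, List.length_cons,
        ih (d + 1) (by omega)]
      omega

lemma pvBuildFrom_nonneg (table : List (List Int)) :
    ∀ (k : Nat) (d : Int), ((table.length : Int) - d).toNat ≤ k →
      ∀ x ∈ pvBuildFrom table d, 0 ≤ x := by
  intro k
  induction k with
  | zero =>
    intro d hk x hx
    rw [pvBuildFrom_of_ge table d (by omega)] at hx
    simp at hx; omega
  | succ k ih =>
    intro d hk x hx
    by_cases h : (table.length : Int) ≤ d
    · rw [pvBuildFrom_of_ge table d h] at hx; simp at hx; omega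
    · rw [pvBuildFrom_of_lt table d (by omega), pvBody_eq] at hx
      have hhead : 0 ≤ (pvBuildFrom table (d + 1)).headD 0 := by
        cases hc : pvBuildFrom table (d + 1) with
        | nil => simp
        | cons a l => exact ih (d + 1) (by omega) a (by rw [hc]; simp)
      rcases List.mem_cons.mp hx with hx | hx
      · subst hx
        split
        · exact le_trans hhead (le_max_left _ _)
        · exact hhead
      · exact ih (d + 1) (by omega) x hx

lemma pvBuildFrom_getD (table : List (List Int)) :
    ∀ (k : Nat) (d : Int),
      (pvBuildFrom table d).getD k 0 = (pvBuildFrom table (d + (k : Int))).headD 0 := by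
  intro k
  induction k with
  | zero =>
    intro d
    rw [show d + ((0 : Nat) : Int) = d by omega]
    cases hc : pvBuildFrom table d <;> simp
  | succ k ih =>
    intro d
    by_cases h : (table.length : Int) ≤ d
    · rw [pvBuildFrom_of_ge table d h,
        pvBuildFrom_of_ge table (d + ((k + 1 : Nat) : Int)) (by push_cast; omega)]
      simp
    · rw [pvBuildFrom_of_lt table d (by omega), pvBody_eq]
      have : (d + 1) + ((k : Nat) : Int) = d + ((k + 1 : Nat) : Int) := by push_cast; omega
      rw [← this, ← ih (d + 1)]
      simp
lemma pvFuel_eq (table : List (List Int)) :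
    ∀ (fuel : Nat) (day ce : Int), -(table.length : Int) ≤ day →
      (∀ row ∈ table.drop day.toNat, 2 ≤ row.length ∧ 1 ≤ row.headD 0) →
      ((table.length : Int) - day).toNat < fuel →
      findmaxearningFuel fuel day ce table = ce + (pvBuildFrom table day).headD 0 := by
  intro fuel
  induction fuel with
  | zero => intro day ce _ _ h; omega
  | succ fuel ih =>
    intro day ce hlow hrows hfuel
    rw [findmaxearningFuel]
    by_cases hge : day ≥ (table.length : Int)
    · rw [if_pos hge, pvBuildFrom_of_ge table day hge]
      simp
    · rw [if_neg hge]
      -- the looked-up row: in range, hence `some`, and a member of the suffix from day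
      obtain ⟨r, hg⟩ : ∃ r, PySem.List.pyGet? table day = some r := by
        cases hg : PySem.List.pyGet? table day with
        | none =>
          rw [PySem.List.pyGet?_eq_none_iff] at hg
          exact absurd (by constructor <;> omega) hg
        | some r => exact ⟨r, rfl⟩
      have hrmem : r ∈ table.drop day.toNat := by
        by_cases hd : 0 ≤ day
        · have := PySem.List.pyGet?_eq_some_getElem table hd (by omega)
          rw [this] at hg
          have hlt : day.toNat < table.length := by omega
          rw [List.drop_eq_getElem_cons hlt]
          exact (Option.some.injEq .. ▸ hg) ▸ List.mem_cons_self ..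
        · rw [show day.toNat = 0 by omega, List.drop_zero]
          exact PySem.List.mem_of_pyGet?_eq_some table hg
      have hsub : ∀ (m : Int), day ≤ m → ∀ x ∈ table.drop m.toNat, x ∈ table.drop day.toNat := by
        intro m hm x hx
        have hdd : table.drop m.toNat = (table.drop day.toNat).drop (m.toNat - day.toNat) := by
          rw [List.drop_drop]; congr 1; omega
        rw [hdd] at hx
        exact List.drop_subset _ _ hx
      obtain ⟨hlen2, hdur1⟩ := hrows r hrmem
      rcases hq : r with _ | ⟨d0, _ | ⟨d1, rest⟩⟩
      · rw [hq] at hlen2; simp at hlen2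
      · rw [hq] at hlen2; simp at hlen2
      rw [hq] at hg hdur1
      have hd0 : 1 ≤ d0 := by simpa using hdur1
      have hget0 : PySem.List.pyGet? (d0 :: d1 :: rest) 0 = some d0 :=
        PySem.List.pyGet?_zero_cons _ _
      have hget1 : PySem.List.pyGet? (d0 :: d1 :: rest) 1 = some d1 := by
        simp [PySem.List.pyGet?, PySem.List.pyIdx?]
      simp only [hg, hget0, hget1]
      have hdplen : ((pvBuildFrom table (day + 1)).length : Int)
          = (table.length : Int) - day := by
        rw [pvBuildFrom_length table (((table.length : Int) - (day + 1)).toNat) (day + 1) le_rfl]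
        omega
      have hdphead : 0 ≤ (pvBuildFrom table (day + 1)).headD 0 := by
        cases hc : pvBuildFrom table (day + 1) with
        | nil => simp
        | cons a l =>
          exact pvBuildFrom_nonneg table (((table.length : Int) - (day + 1)).toNat) (day + 1)
            le_rfl a (by rw [hc]; simp)
      have hskip : findmaxearningFuel fuel (day + 1) ce table
          = ce + (pvBuildFrom table (day + 1)).headD 0 :=
        ih (day + 1) ce (by omega)
          (fun x hx => hrows x (hsub (day + 1) (by omega) x hx)) (by omega)
      have hB : (pvBuildFrom table day).headD 0 =
          if 1 ≤ d0 ∧ d0 ≤ ((pvBuildFrom table (day + 1)).length : Int) then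
            max ((pvBuildFrom table (day + 1)).headD 0)
              (d1 + (pvBuildFrom table (day + 1)).getD (d0 - 1).toNat 0)
          else (pvBuildFrom table (day + 1)).headD 0 := by
        rw [pvBuildFrom_of_lt table day (by omega), pvBody_eq, hg]
        simp only [Option.getD_some, hget0, hget1]
        simp
      by_cases hc : day + d0 ≤ (table.length : Int)
      · rw [if_pos hc]
        have htake : findmaxearningFuel fuel (day + d0) (ce + d1) table
            = ce + d1 + (pvBuildFrom table (day + d0)).headD 0 :=
          ih (day + d0) (ce + d1) (by omega)
            (fun x hx => hrows x (hsub (day + d0) (by omega) x hx)) (by omega)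
        have hidx : (pvBuildFrom table (day + 1)).getD (d0 - 1).toNat 0
            = (pvBuildFrom table (day + d0)).headD 0 := by
          rw [pvBuildFrom_getD table ((d0 - 1).toNat) (day + 1),
            show (day + 1) + (((d0 - 1).toNat : Nat) : Int) = day + d0 by omega]
        rw [hskip, htake, hB, if_pos ⟨hd0, by omega⟩, hidx]
        rcases le_total ((pvBuildFrom table (day + 1)).headD 0)
            (d1 + (pvBuildFrom table (day + d0)).headD 0) with h | h
        · rw [max_eq_right h, max_eq_right (by omega)]; ring
        · rw [max_eq_left h, max_eq_left (by omega)]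
      · rw [if_neg hc]
        rw [hskip, hB, if_neg (by omega)]
        rw [max_eq_left (by omega)]

-- ===== VERDICT (by name: the statement is the Claim_ definition above) =====
theorem findmaxearning_spec : Claim_equal_findmaxearning := by
  intro day ce table _ hpre
  unfold Spec_findmaxearning
  obtain ⟨hlow, hrows⟩ := hpre
  have hA : findmaxearning day ce table = ce + (pvBuildFrom table day).headD 0 := by
    unfold findmaxearning
    exact pvFuel_eq table _ day ce hlow hrows (by omega)
  unfold findmaxearning_alt
  by_cases hge : day ≥ (table.length : Int)
  · rw [if_pos hge, hA, pvBuildFrom_of_ge table day hge]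
    simp
  · rw [if_neg hge, hA]
    show ce + (pvBuildFrom table day).headD 0
      = ce + (((PySem.List.pyRange day (table.length : Int)).reverse).foldl (pvBody table) [0]).headD 0
    rw [List.foldl_reverse]
    rfl
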